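-- pv_equiv track=rewrite | github.com/MarielaCarlita/M | codigo2.py | count_and_remove_occurrences
-- ===== SOURCE A (Python) =====
-- def count_and_remove_occurrences (element, element_list):
--     count = 0
--     index = 0
--     while index < len(element_list):
--         if element_list[index] == element:
--             count += 1
--             element_list.pop(index)
--         else:
--             index += 1
--     return count
-- ===== SOURCE B (Python) =====
-- def count_and_remove_occurrences(element, element_list):
--     w = 0
--     count = 0
--     for x in element_list:
--         if x == element:
--             count += 1
--         else:
--             element_list[w] = x
--             w += 1
--     del element_list[w:]
--     return count
-- ===== Notes on version B (the rewrite author's own statement) =====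
-- stated objective: faster
-- what changed: Replaces the quadratic while-loop with repeated pop(index) by a single-pass in-place two-pointer compaction (write cursor + overwrite, then truncate once).
import Mathlib
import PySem

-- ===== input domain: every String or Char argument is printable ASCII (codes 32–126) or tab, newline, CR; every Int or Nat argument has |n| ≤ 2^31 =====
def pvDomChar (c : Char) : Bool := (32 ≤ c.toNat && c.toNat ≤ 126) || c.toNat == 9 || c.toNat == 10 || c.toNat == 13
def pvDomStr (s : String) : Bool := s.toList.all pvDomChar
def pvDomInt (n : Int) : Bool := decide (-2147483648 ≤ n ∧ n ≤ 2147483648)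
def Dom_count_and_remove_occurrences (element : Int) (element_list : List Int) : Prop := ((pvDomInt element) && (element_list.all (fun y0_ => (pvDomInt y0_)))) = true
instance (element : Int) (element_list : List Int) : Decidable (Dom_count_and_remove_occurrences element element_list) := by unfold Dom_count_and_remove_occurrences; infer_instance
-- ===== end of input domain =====

-- B replaces A's quadratic pop(index) while-loop with a one-pass in-place two-pointer
-- compaction returning the same count; equivalence proved for the RETURN value (both
-- Pythons also leave the list in the same final state, but only the return is claimed).
-- ===== PORT A =====
-- A's while loop: state (count, index, list); pop(index) = List.eraseIdx; index is
-- always ≥ 0 in A, transcribed as Nat.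
def pvALoop (element : Int) (count : Int) (index : Nat) (l : List Int) : Int :=
  if h : index < l.length then
    if l[index] = element then
      pvALoop element (count + 1) index (l.eraseIdx index)
    else
      pvALoop element count (index + 1) l
  else count
termination_by l.length - index
decreasing_by
  · simp [List.length_eraseIdx, h]; omega
  · omega

def count_and_remove_occurrences (element : Int) (element_list : List Int) : Int :=
  pvALoop element 0 0 element_list

-- ===== PORT B =====
-- B's single for-loop over the elements: state (kept-prefix, count); the write
-- cursor w is the length of the kept prefix; the final truncation does not affect
-- the returned count.
def count_and_remove_occurrences_alt (element : Int) (element_list : List Int) : Int :=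
  (element_list.foldl
    (fun (s : List Int × Int) x =>
      if x = element then (s.1, s.2 + 1) else (s.1 ++ [x], s.2))
    ([], 0)).2

-- ===== PRECONDITION & SPEC =====
def Spec_count_and_remove_occurrences (element : Int) (element_list : List Int) (out : Int) : Prop := out = count_and_remove_occurrences_alt element element_list
instance (element : Int) (element_list : List Int) (out : Int) : Decidable (Spec_count_and_remove_occurrences element element_list out) := by unfold Spec_count_and_remove_occurrences; infer_instance

-- ===== CLAIM (what is proved, stated in full; the proofs are below) =====
def Claim_equal_count_and_remove_occurrences : Prop := ∀ (element : Int) (element_list : List Int), Dom_count_and_remove_occurrences element element_list → Spec_count_and_remove_occurrences element element_list (count_and_remove_occurrences element element_list)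

-- ===== LEMMAS AND PROOFS =====

-- A's loop from any index counts `count` plus the matches in the tail l.drop index.
theorem pvALoop_eq (element : Int) : ∀ (l : List Int) (index : Nat) (count : Int),
    pvALoop element count index l
      = count + ((l.drop index).countP (fun x => x = element) : Int) := by
  intro l index count
  fun_induction pvALoop element count index l with
  | case1 count index l h heq ih =>
    rw [ih]
    have hd : (l.eraseIdx index).drop index = l.drop (index + 1) := by
      have hlen : (l.take index).length = index := List.length_take_of_le (le_of_lt h)
      rw [List.eraseIdx_eq_take_drop_succ]
      exact List.drop_left' hlen
    rw [hd, List.drop_eq_getElem_cons h, List.countP_cons]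
    simp [heq]
    omega
  | case2 count index l h heq ih =>
    rw [ih, List.drop_eq_getElem_cons h, List.countP_cons]
    simp [heq]
  | case3 count index l h =>
    rw [List.drop_eq_nil_of_le (by omega)]
    simp

-- B's fold accumulates the count of matches; the kept prefix is irrelevant to .2.
theorem pvBLoop_eq (element : Int) (l : List Int) : ∀ (kept : List Int) (count : Int),
    (l.foldl
      (fun (s : List Int × Int) x =>
        if x = element then (s.1, s.2 + 1) else (s.1 ++ [x], s.2))
      (kept, count)).2 = count + (l.countP (fun x => x = element) : Int) := by
  induction l with
  | nil => simp
  | cons x xs ih =>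
    intro kept count
    by_cases hx : x = element
    · simp [hx, ih]; omega
    · simp [hx, ih]

-- ===== VERDICT (by name: the statement is the Claim_ definition above) =====
theorem count_and_remove_occurrences_spec : Claim_equal_count_and_remove_occurrences := by
  intro element element_list _
  unfold Spec_count_and_remove_occurrences count_and_remove_occurrences
    count_and_remove_occurrences_alt
  rw [pvALoop_eq, pvBLoop_eq]
  simp
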